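-- pv_equiv track=rewrite | github.com/leonorbrodrigues-png/LeonorBR_thesis- | merging approach/approach3.2.py | get_ontology_depth_structural
-- ===== SOURCE A (Python) =====
-- def get_ontology_depth_structural(po_term, ontology, root_terms=None):
--
--     if root_terms is None:
--         root_terms = ['PO:0025131', 'PO:0009011', 'PO:0009003']
--
--     if po_term in root_terms:
--         return 0
--
--     if po_term not in ontology:
--         return 10
--
--     depth = 1
--     parents = ontology[po_term].get('parents', [])
--
--     if not parents:
--         return depth
--
--     min_parent_depth = float('inf')
--     for rel_type, parent in parents:
--         parent_depth = get_ontology_depth_structural(parent, ontology, root_terms)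
--         min_parent_depth = min(min_parent_depth, parent_depth)
--
--     return min_parent_depth + 1
-- ===== SOURCE B (Python) =====
-- def get_ontology_depth_structural(po_term, ontology, root_terms=None):
--     if root_terms is None:
--         root_terms = ['PO:0025131', 'PO:0009011', 'PO:0009003']
--     roots = set(root_terms)
--
--     def val(depth, t):
--         # value of a term given the current table: roots are 0, unknown terms 10
--         return 0 if t in roots else depth.get(t, 10)
--
--     # Bottom-up dynamic programming instead of A's top-down recursion:
--     # after k rounds, depth[t] equals A's recursion cut off at depth k; any
--     # terminating run of A recurses at most len(ontology)+1 deep, so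
--     # len(ontology)+1 rounds (with an early exit at the fixpoint) suffice.
--     depth = {t: 10 for t in ontology}
--     for _ in range(len(ontology) + 1):
--         new = {}
--         for t, record in ontology.items():
--             if t in roots:
--                 new[t] = 0
--             else:
--                 parents = record.get('parents', [])
--                 if not parents:
--                     new[t] = 1
--                 else:
--                     new[t] = 1 + min(val(depth, p) for _, p in parents)
--         if new == depth:
--             break
--         depth = new
--     return val(depth, po_term)
-- ===== Notes on version B (the rewrite author's own statement) =====
-- stated objective: alternative
-- what changed: A's naive top-down recursion (re-exploring every ancestor path, exponential on dense DAGs) is replaced by bottom-up dynamic programming: a depth table over all ontology terms is relaxed round by round (at most len(ontology)+1 rounds, stopping early at the fixpoint), then the answer is one lookup; works in any key order.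
import Mathlib
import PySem

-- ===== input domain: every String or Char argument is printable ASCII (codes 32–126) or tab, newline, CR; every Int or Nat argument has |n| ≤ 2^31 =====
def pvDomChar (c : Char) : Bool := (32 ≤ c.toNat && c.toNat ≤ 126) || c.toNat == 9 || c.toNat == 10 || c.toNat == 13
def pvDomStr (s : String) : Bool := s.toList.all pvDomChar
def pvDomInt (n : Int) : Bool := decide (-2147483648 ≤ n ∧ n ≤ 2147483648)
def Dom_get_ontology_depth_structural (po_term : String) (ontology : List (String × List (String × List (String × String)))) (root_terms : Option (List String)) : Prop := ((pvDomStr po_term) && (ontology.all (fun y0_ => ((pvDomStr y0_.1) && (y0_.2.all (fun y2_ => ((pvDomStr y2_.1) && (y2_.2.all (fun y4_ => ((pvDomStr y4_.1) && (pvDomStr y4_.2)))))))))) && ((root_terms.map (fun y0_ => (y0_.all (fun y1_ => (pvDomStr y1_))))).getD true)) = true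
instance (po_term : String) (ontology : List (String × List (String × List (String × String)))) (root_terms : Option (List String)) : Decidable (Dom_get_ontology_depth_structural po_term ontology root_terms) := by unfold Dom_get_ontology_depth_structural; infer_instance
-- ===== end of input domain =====

-- B replaces A's naive top-down recursion by bottom-up dynamic programming: a depth table
-- over the ontology terms is relaxed round by round (fixpoint early-exit), then one lookup
-- (objective: alternative; equivalence is about the return value, neither mutates its input).

-- shared helpers: resolution of the default root list and the 'parents' lookup
-- (both Pythons contain these exact lines; a record is a dict, looked up first-match)
def pvRoots (root_terms : Option (List String)) : List String :=
  match root_terms with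
  | none => ["PO:0025131", "PO:0009011", "PO:0009003"]
  | some r => r

def pvParentsOf (record : List (String × List (String × String))) : List (String × String) :=
  ((record.find? (fun e => e.1 == "parents")).map (fun e => e.2)).getD []

-- ===== PORT A =====
-- naive recursion; fuel ontology.length+1 suffices on every input admitted by Pre_ (a
-- terminating run of the Python recursion visits pairwise distinct non-root keys, so its
-- depth is at most ontology.length+1); the fuel-0 base is unreachable under Pre_
def pvAGo (ontology : List (String × List (String × List (String × String)))) (roots : List String) :
    Nat → String → Int
  | 0, t => if t ∈ roots then 0 else 10
  | fuel + 1, t =>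
    if t ∈ roots then 0
    else
      match ontology.find? (fun e => e.1 == t) with
      | none => 10
      | some entry =>
        match pvParentsOf entry.2 with
        | [] => 1
        | p :: ps =>
          -- min_parent_depth starts at float('inf'): modelled as Option Int (none = inf)
          ((((p :: ps).foldl
              (fun acc pr =>
                let pd := pvAGo ontology roots fuel pr.2
                some (match acc with
                      | none => pd
                      | some a => min a pd))
              none).getD 0)) + 1

def get_ontology_depth_structural (po_term : String) (ontology : List (String × List (String × List (String × String)))) (root_terms : Option (List String)) : Int :=
  pvAGo ontology (pvRoots root_terms) (ontology.length + 1) po_term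

-- ===== PORT B =====
-- val(depth, t): 0 for a root, else depth.get(t, 10)
def pvVal (roots : PySem.Set String) (d : PySem.Dict String Int) (t : String) : Int :=
  if t ∈ roots then 0 else d.getD t 10

-- the value one relaxation round stores for one ontology entry
def pvStep (roots : PySem.Set String) (d : PySem.Dict String Int)
    (entry : String × List (String × List (String × String))) : Int :=
  if entry.1 ∈ roots then 0
  else
    match pvParentsOf entry.2 with
    | [] => 1
    | p :: ps => 1 + ps.foldl (fun m pr => min m (pvVal roots d pr.2)) (pvVal roots d p.2)

def pvRound (ontology : List (String × List (String × List (String × String))))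
    (roots : PySem.Set String) (d : PySem.Dict String Int) : PySem.Dict String Int :=
  ontology.foldl (fun nd e => nd.insert e.1 (pvStep roots d e)) PySem.Dict.empty

-- depth = {t: 10 for t in ontology}
def pvInit (ontology : List (String × List (String × List (String × String)))) : PySem.Dict String Int :=
  ontology.foldl (fun d e => d.insert e.1 (10 : Int)) PySem.Dict.empty

-- k relaxation rounds with the Python loop's fixpoint early-exit (break when new == depth)
def pvIter (ontology : List (String × List (String × List (String × String))))
    (roots : PySem.Set String) : Nat → PySem.Dict String Int
  | 0 => pvInit ontology
  | k + 1 =>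
    let d := pvIter ontology roots k
    let nd := pvRound ontology roots d
    if nd = d then d else nd

def get_ontology_depth_structural_alt (po_term : String) (ontology : List (String × List (String × List (String × String)))) (root_terms : Option (List String)) : Int :=
  let roots := PySem.Set.ofList (pvRoots root_terms)
  pvVal roots (pvIter ontology roots (ontology.length + 1)) po_term

-- ===== PRECONDITION & SPEC =====
-- graph helpers for Pre_ only: successors of a term in the parent graph A walks
def pvSuccs (ontology : List (String × List (String × List (String × String))))
    (roots : List String) (t : String) : List String :=
  if t ∈ roots then []
  else
    match ontology.find? (fun e => e.1 == t) with
    | none => []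
    | some e => (pvParentsOf e.2).map Prod.snd

-- every node of the parent graph is a key or a parent string, so this many closure rounds suffice
def pvNodeBound (ontology : List (String × List (String × List (String × String)))) : Nat :=
  1 + ontology.length + (ontology.map (fun e => (pvParentsOf e.2).length)).sum

def pvReach (ontology : List (String × List (String × List (String × String))))
    (roots : List String) : Nat → PySem.Set String → PySem.Set String
  | 0, s => s
  | n + 1, s => pvReach ontology roots n (PySem.Set.update s (s.flatMap (pvSuccs ontology roots)))

-- no term reachable from po_term lies on a cycle of the parent graph
def pvAcyclicFrom (po_term : String) (ontology : List (String × List (String × List (String × String))))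
    (roots : List String) : Bool :=
  (pvReach ontology roots (pvNodeBound ontology) (PySem.Set.ofList [po_term])).all
    (fun t => !(decide (t ∈ pvReach ontology roots (pvNodeBound ontology)
                          (PySem.Set.ofList (pvSuccs ontology roots t)))))

-- Pre_ excludes (a) association lists with duplicate outer or record keys, which cannot arise
-- from the Python dicts A receives, and (b) inputs where a parent cycle is reachable from
-- po_term, on which A recurses forever (RecursionError); everything else is admitted.
def Pre_get_ontology_depth_structural (po_term : String) (ontology : List (String × List (String × List (String × String)))) (root_terms : Option (List String)) : Prop :=
  (ontology.map Prod.fst).Nodup ∧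
  (∀ entry ∈ ontology, (entry.2.map Prod.fst).Nodup) ∧
  pvAcyclicFrom po_term ontology (pvRoots root_terms) = true

instance (po_term : String) (ontology : List (String × List (String × List (String × String)))) (root_terms : Option (List String)) : Decidable (Pre_get_ontology_depth_structural po_term ontology root_terms) := by unfold Pre_get_ontology_depth_structural; infer_instance

def pvWitness_get_ontology_depth_structural : String × (List (String × List (String × List (String × String)))) × Option (List String) :=
  ("A", [("B", [("parents", [])]), ("A", [("parents", [("is_a", "B")])])], some ["R"])

def Spec_get_ontology_depth_structural (po_term : String) (ontology : List (String × List (String × List (String × String)))) (root_terms : Option (List String)) (out : Int) : Prop := out = get_ontology_depth_structural_alt po_term ontology root_terms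
instance (po_term : String) (ontology : List (String × List (String × List (String × String)))) (root_terms : Option (List String)) (out : Int) : Decidable (Spec_get_ontology_depth_structural po_term ontology root_terms out) := by unfold Spec_get_ontology_depth_structural; infer_instance

-- ===== CLAIM (what is proved, stated in full; the proofs are below) =====
def Claim_equal_get_ontology_depth_structural : Prop := ∀ (po_term : String) (ontology : List (String × List (String × List (String × String)))) (root_terms : Option (List String)), Dom_get_ontology_depth_structural po_term ontology root_terms → Pre_get_ontology_depth_structural po_term ontology root_terms → Spec_get_ontology_depth_structural po_term ontology root_terms (get_ontology_depth_structural po_term ontology root_terms)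

-- ===== LEMMAS AND PROOFS =====

-- the Python loop's fixpoint early-exit never changes the value of a round
lemma pvIter_succ (o : List (String × List (String × List (String × String))))
    (R : PySem.Set String) (k : Nat) :
    pvIter o R (k + 1) = pvRound o R (pvIter o R k) := by
  simp only [pvIter]
  split_ifs with h
  · exact h.symm
  · rfl

-- {t: 10 for t in ontology} looks up to 10 everywhere (keys hold 10, others hit the default)
lemma pv_getD_init (o : List (String × List (String × List (String × String))))
    (d : PySem.Dict String Int) (t : String) (hd : d.getD t 10 = 10) :
    (o.foldl (fun d e => d.insert e.1 (10 : Int)) d).getD t 10 = 10 := by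
  induction o generalizing d with
  | nil => exact hd
  | cons a o ih =>
    refine ih _ ?_
    rw [PySem.Dict.getD_insert]
    split_ifs <;> simp [hd]

-- a round inserts only keys: a non-key falls through to the accumulator
lemma pv_getD_fold_not_mem (o : List (String × List (String × List (String × String))))
    (f : String × List (String × List (String × String)) → Int)
    (d : PySem.Dict String Int) (t : String) (h : t ∉ o.map Prod.fst) :
    (o.foldl (fun nd e => nd.insert e.1 (f e)) d).getD t 10 = d.getD t 10 := by
  induction o generalizing d with
  | nil => rfl
  | cons a o ih =>
    simp only [List.map_cons, List.mem_cons, not_or] at h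
    rw [List.foldl_cons, ih _ h.2, PySem.Dict.getD_insert, if_neg h.1]

-- with unique keys, the round's table at a key is the step applied to its (first-match) entry
lemma pv_getD_fold_find (o : List (String × List (String × List (String × String))))
    (f : String × List (String × List (String × String)) → Int)
    (d : PySem.Dict String Int) (t : String)
    (e : String × List (String × List (String × String)))
    (hnd : (o.map Prod.fst).Nodup) (hf : o.find? (fun e' => e'.1 == t) = some e) :
    (o.foldl (fun nd e' => nd.insert e'.1 (f e')) d).getD t 10 = f e := by
  induction o generalizing d with
  | nil => simp at hf
  | cons a o ih =>
    simp only [List.map_cons, List.nodup_cons] at hnd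
    by_cases ha : a.1 = t
    · rw [List.find?_cons_of_pos (by simpa using ha)] at hf
      cases hf
      rw [List.foldl_cons, pv_getD_fold_not_mem o f _ t (ha ▸ hnd.1),
        PySem.Dict.getD_insert, if_pos ha.symm]
    · rw [List.find?_cons_of_neg (by simpa using ha)] at hf
      rw [List.foldl_cons]
      exact ih _ hnd.2 hf

-- A's inner loop: folding Python's min from float('inf') (Option) over a nonempty list
-- equals folding plain min from the first value
lemma pv_foldl_minO {α : Type} (g : α → Int) (ps : List α) (a : Int) :
    ps.foldl
      (fun acc pr =>
        let pd := g pr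
        some (match acc with
              | none => pd
              | some x => min x pd)) (some a)
      = some (ps.foldl (fun m pr => min m (g pr)) a) := by
  induction ps generalizing a with
  | nil => rfl
  | cons p ps ih => simpa using ih (min a (g p))

-- MAIN INVARIANT: after k rounds, B's lookup at any term equals A's recursion with fuel k
-- (the fuel-0 base of the A port is exactly the initial table)
lemma pv_main (o : List (String × List (String × List (String × String)))) (roots : List String)
    (hnd : (o.map Prod.fst).Nodup) :
    ∀ k t, pvVal (PySem.Set.ofList roots) (pvIter o (PySem.Set.ofList roots) k) t
             = pvAGo o roots k t := by
  intro k
  induction k with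
  | zero =>
    intro t
    simp only [pvIter, pvVal, pvAGo, PySem.Set.mem_ofList]
    split_ifs with hr
    · rfl
    · exact pv_getD_init o PySem.Dict.empty t (PySem.Dict.getD_empty ..)
  | succ k ih =>
    intro t
    rw [pvIter_succ]
    by_cases hr : t ∈ roots
    · simp [pvVal, pvAGo, PySem.Set.mem_ofList, hr]
    · rw [pvVal, if_neg (by simpa [PySem.Set.mem_ofList] using hr)]
      cases hfind : o.find? (fun e => e.1 == t) with
      | none =>
        have hk : t ∉ o.map Prod.fst := by
          intro hm
          obtain ⟨e, he, hfst⟩ := List.mem_map.mp hm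
          have := List.find?_eq_none.mp hfind e he
          simp [hfst] at this
        rw [pvRound, pv_getD_fold_not_mem o _ _ t hk]
        simp [pvAGo, hr, hfind, PySem.Dict.getD_empty]
      | some e =>
        have het : e.1 = t := by
          have := List.find?_some hfind
          simpa using this
        rw [pvRound, pv_getD_fold_find o _ _ t e hnd hfind]
        rw [pvStep, if_neg (by simpa [PySem.Set.mem_ofList, het] using hr)]
        simp only [pvAGo, if_neg hr, hfind]
        cases hp : pvParentsOf e.2 with
        | nil => rfl
        | cons p ps =>
          simp only [List.foldl_cons]
          rw [pv_foldl_minO (fun pr => pvAGo o roots k pr.2) ps]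
          have hfuns : (fun (m : Int) (pr : String × String) => min m (pvVal (PySem.Set.ofList roots) (pvIter o (PySem.Set.ofList roots) k) pr.2))
              = (fun (m : Int) (pr : String × String) => min m (pvAGo o roots k pr.2)) := by
            funext m pr
            rw [ih]
          rw [hfuns, ih]
          simp only [Option.getD_some]
          omega

-- ===== VERDICT (by name: the statement is the Claim_ definition above) =====
theorem get_ontology_depth_structural_spec : Claim_equal_get_ontology_depth_structural := by
  intro po o rt _ hpre
  unfold Spec_get_ontology_depth_structural
  unfold get_ontology_depth_structural get_ontology_depth_structural_alt
  exact (pv_main o (pvRoots rt) hpre.1 (o.length + 1) po).symm
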